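-- pv_equiv track=rewrite | github.com/Scille/parsec-cloud | tests/core/fs/test_buffer_ordering.py | build_contiguous_writtings
-- ===== SOURCE A (Python) =====
-- def build_contiguous_writtings(non_contiguous_writtings, block_size):
--     # Writtings must not form holes for this test
--     writtings = []
--     curr_offset = 0
--     for writting in non_contiguous_writtings:
--         start = min(*writting, curr_offset)
--         end = max(*writting)
--         writtings.append((start, end))
--         curr_offset = max(end, curr_offset)
--     if curr_offset < block_size:
--         writtings.append((curr_offset, block_size))
--
--     return writtings
-- ===== SOURCE B (Python) =====
-- def build_contiguous_writtings(non_contiguous_writtings, block_size):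
--     ws = list(non_contiguous_writtings)
--     # Each interval computed independently: the offset before write i is the
--     # max of 0 and all earlier writes' ends, recomputed from scratch (no running state).
--     result = [
--         (min(min(w), max([0] + [max(v) for v in ws[:i]])), max(w))
--         for i, w in enumerate(ws)
--     ]
--     total = max([0] + [max(v) for v in ws])
--     if total < block_size:
--         result.append((total, block_size))
--     return result
-- ===== Notes on version B (the rewrite author's own statement) =====
-- stated objective: alternative
-- what changed: Removes the running-offset accumulator entirely: each interval is computed independently by recomputing from scratch the max of 0 and all earlier writes' ends (a prefix scan per index), trading A's O(n) single pass for stateless O(n^2) per-element computation.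
import Mathlib
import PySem

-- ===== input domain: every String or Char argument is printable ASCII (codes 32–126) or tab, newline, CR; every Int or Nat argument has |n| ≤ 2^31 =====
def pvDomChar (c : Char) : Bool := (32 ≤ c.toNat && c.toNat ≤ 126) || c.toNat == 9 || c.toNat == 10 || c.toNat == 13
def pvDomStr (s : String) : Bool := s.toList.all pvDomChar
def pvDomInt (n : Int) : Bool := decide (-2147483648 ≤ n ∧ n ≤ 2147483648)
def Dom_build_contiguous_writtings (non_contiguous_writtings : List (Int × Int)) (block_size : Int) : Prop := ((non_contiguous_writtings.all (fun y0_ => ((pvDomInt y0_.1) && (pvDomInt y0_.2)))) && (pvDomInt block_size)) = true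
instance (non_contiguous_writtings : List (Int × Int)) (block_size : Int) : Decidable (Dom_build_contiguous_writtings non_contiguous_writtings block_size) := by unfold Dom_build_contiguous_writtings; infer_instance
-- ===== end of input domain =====

-- B replaces A's running-offset accumulator by stateless per-index recomputation of the prefix maximum (alternative decomposition, O(n^2) vs O(n)).

-- ===== PORT A =====
-- Port of A: one fused loop carrying (writtings, curr_offset).
def build_contiguous_writtings (non_contiguous_writtings : List (Int × Int)) (block_size : Int) : List (Int × Int) :=
  let st := non_contiguous_writtings.foldl
    (fun (acc : List (Int × Int) × Int) (w : Int × Int) =>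
      let start := min (min w.1 w.2) acc.2
      let e := max w.1 w.2
      (acc.1 ++ [(start, e)], max e acc.2)) ([], 0)
  if st.2 < block_size then st.1 ++ [(st.2, block_size)] else st.1

-- ===== PORT B =====
-- pvEnumLoop ws rest i: the comprehension 'for i, w in enumerate(ws)' where rest is the suffix of ws from index i;
-- each element recomputes max([0] + [max(v) for v in ws[:i]]) from scratch.
def pvEnumLoop (ws : List (Int × Int)) (rest : List (Int × Int)) (i : Nat) : List (Int × Int) :=
  match rest with
  | [] => []
  | w :: t =>
    (min (min w.1 w.2) (((ws.take i).map (fun v => max v.1 v.2)).foldl max 0), max w.1 w.2)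
      :: pvEnumLoop ws t (i + 1)

-- Port of B: stateless comprehension + from-scratch total maximum + final padding.
def build_contiguous_writtings_alt (non_contiguous_writtings : List (Int × Int)) (block_size : Int) : List (Int × Int) :=
  let ws := non_contiguous_writtings
  let result := pvEnumLoop ws ws 0
  let total := (ws.map (fun v => max v.1 v.2)).foldl max 0
  if total < block_size then result ++ [(total, block_size)] else result

-- ===== PRECONDITION & SPEC =====
def Spec_build_contiguous_writtings (non_contiguous_writtings : List (Int × Int)) (block_size : Int) (out : List (Int × Int)) : Prop := out = build_contiguous_writtings_alt non_contiguous_writtings block_size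
instance (non_contiguous_writtings : List (Int × Int)) (block_size : Int) (out : List (Int × Int)) : Decidable (Spec_build_contiguous_writtings non_contiguous_writtings block_size out) := by unfold Spec_build_contiguous_writtings; infer_instance

-- ===== CLAIM (what is proved, stated in full; the proofs are below) =====
def Claim_equal_build_contiguous_writtings : Prop := ∀ (non_contiguous_writtings : List (Int × Int)) (block_size : Int), Dom_build_contiguous_writtings non_contiguous_writtings block_size → Spec_build_contiguous_writtings non_contiguous_writtings block_size (build_contiguous_writtings non_contiguous_writtings block_size)

-- ===== LEMMAS AND PROOFS =====

-- the intervals A's loop produces, starting from offset c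
def pvCore (l : List (Int × Int)) (c : Int) : List (Int × Int) :=
  match l with
  | [] => []
  | w :: t => (min (min w.1 w.2) c, max w.1 w.2) :: pvCore t (max (max w.1 w.2) c)

-- the final offset A's loop reaches, starting from c
def pvFin (l : List (Int × Int)) (c : Int) : Int :=
  match l with
  | [] => c
  | w :: t => pvFin t (max (max w.1 w.2) c)

theorem pvFoldA (l : List (Int × Int)) (lst : List (Int × Int)) (c : Int) :
    l.foldl (fun (acc : List (Int × Int) × Int) (w : Int × Int) =>
      (acc.1 ++ [(min (min w.1 w.2) acc.2, max w.1 w.2)], max (max w.1 w.2) acc.2)) (lst, c)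
    = (lst ++ pvCore l c, pvFin l c) := by
  induction l generalizing lst c with
  | nil => simp [pvCore, pvFin]
  | cons w t ih =>
    simp only [List.foldl, pvCore, pvFin]
    rw [ih]
    simp

theorem pvFin_foldmax (l : List (Int × Int)) (c : Int) :
    pvFin l c = (l.map (fun w => max w.1 w.2)).foldl max c := by
  induction l generalizing c with
  | nil => simp [pvFin]
  | cons w t ih => simp [pvFin, ih, max_comm]

theorem pvEnum_core (t : List (Int × Int)) : ∀ (pre : List (Int × Int)),
    pvEnumLoop (pre ++ t) t pre.length
      = pvCore t ((pre.map (fun v => max v.1 v.2)).foldl max 0) := by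
  induction t with
  | nil => intro pre; simp [pvEnumLoop, pvCore]
  | cons w t' ih =>
    intro pre
    have htake : (pre ++ w :: t').take pre.length = pre := by
      simp [List.take_left (l₁ := pre) (l₂ := w :: t')]
    have hrec : pvEnumLoop (pre ++ w :: t') t' (pre.length + 1)
        = pvCore t' (((pre ++ [w]).map (fun v => max v.1 v.2)).foldl max 0) := by
      have := ih (pre ++ [w])
      simp at this
      simpa using this
    simp only [pvEnumLoop, pvCore, htake, hrec]
    congr 1
    congr 1
    simp [max_comm]

-- ===== VERDICT (by name: the statement is the Claim_ definition above) =====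
theorem build_contiguous_writtings_spec : Claim_equal_build_contiguous_writtings := by
  intro ncw bs _
  unfold Spec_build_contiguous_writtings build_contiguous_writtings build_contiguous_writtings_alt
  simp only
  rw [pvFoldA ncw [] 0]
  have h := pvEnum_core ncw []
  simp only [List.nil_append, List.length_nil, List.map_nil, List.foldl_nil] at h
  rw [h, ← pvFin_foldmax ncw 0]
  simp
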